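-- pv_equiv track=rewrite | github.com/brucekevinadams/Python | StockMaximize.py | stockmax
-- ===== SOURCE A (Python) =====
-- def stockmax(prices):
--     price = 0
--     cost = 0
--     income = 0
--     for i in range(len(prices)-1,-1,-1):
--         if price < prices[i]:
--             price = prices[i]
--         else:
--             cost += prices[i]
--             income += price
--     return income-cost
-- ===== SOURCE B (Python) =====
-- def stockmax(prices):
--     # Two phases: build the inclusive suffix-maximum table, then sum the per-day profits.
--     suf = []
--     best = 0
--     for p in reversed(prices):
--         best = max(best, p)
--         suf.append(best)
--     suf.reverse()
--     return sum(m - p for m, p in zip(suf, prices))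
-- ===== Notes on version B (the rewrite author's own statement) =====
-- stated objective: alternative
-- what changed: Replaces A's single fused backward scan with if/else state (price/cost/income) by two phases: build the inclusive suffix-maximum table in one reversed pass, then sum suf[i]-prices[i] over a zip.
import Mathlib
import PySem

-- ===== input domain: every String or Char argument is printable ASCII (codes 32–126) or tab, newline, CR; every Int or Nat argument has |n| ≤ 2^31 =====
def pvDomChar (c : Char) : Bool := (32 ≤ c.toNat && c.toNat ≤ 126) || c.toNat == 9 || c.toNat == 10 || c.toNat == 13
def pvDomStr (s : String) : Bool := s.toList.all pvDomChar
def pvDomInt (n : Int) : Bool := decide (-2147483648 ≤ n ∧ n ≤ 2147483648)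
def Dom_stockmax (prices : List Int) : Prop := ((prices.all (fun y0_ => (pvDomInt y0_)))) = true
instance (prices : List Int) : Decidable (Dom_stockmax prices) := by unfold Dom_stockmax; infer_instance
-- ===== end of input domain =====

-- B replaces A's fused backward scan (price/cost/income with if/else) by two phases:
-- build the inclusive suffix-maximum table, then sum the per-day differences (alternative decomposition, same cost).


-- ===== PORT A =====
def stockmax (prices : List Int) : Int :=
  let st := (PySem.List.pyRange ((prices.length : Int) - 1) (-1) (-1)).foldl
    (fun (st : Int × Int × Int) i =>
      -- prices[i]; i is always in range in A's loop, so the default 0 is never used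
      if st.1 < PySem.List.pyGetD prices i 0 then (PySem.List.pyGetD prices i 0, st.2.1, st.2.2)
      else (st.1, st.2.1 + PySem.List.pyGetD prices i 0, st.2.2 + st.1)) (0, 0, 0)
  st.2.2 - st.2.1

-- ===== PORT B =====
def stockmax_alt (prices : List Int) : Int :=
  let st := prices.reverse.foldl
    (fun (st : List Int × Int) p =>
      let best := max st.2 p
      (st.1 ++ [best], best)) ([], 0)
  let suf := st.1.reverse
  (suf.zip prices).foldl (fun t mp => t + (mp.1 - mp.2)) 0

-- ===== PRECONDITION & SPEC =====
def Spec_stockmax (prices : List Int) (out : Int) : Prop := out = stockmax_alt prices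
instance (prices : List Int) (out : Int) : Decidable (Spec_stockmax prices out) := by unfold Spec_stockmax; infer_instance

-- ===== CLAIM (what is proved, stated in full; the proofs are below) =====
def Claim_equal_stockmax : Prop := ∀ (prices : List Int), Dom_stockmax prices → Spec_stockmax prices (stockmax prices)

-- ===== LEMMAS AND PROOFS =====

/-- The profit both programs compute, as a right-to-left recursion over the reversed price
list with the running (0-floored) maximum `b`. -/
def pvBsum : List Int → Int → Int
  | [], _ => 0
  | p :: r, b => (max b p - p) + pvBsum r (max b p)

/-- The suffix-maximum list B builds, in processing order, as a recursion. -/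
def pvSufR : List Int → Int → List Int
  | [], _ => []
  | p :: r, b => max b p :: pvSufR r (max b p)

theorem pvSufR_length (r : List Int) (b : Int) : (pvSufR r b).length = r.length := by
  induction r generalizing b with
  | nil => rfl
  | cons p r ih => simp [pvSufR, ih]

theorem stockmax_foldlA (r : List Int) (price cost income : Int) :
    (r.foldl (fun (st : Int × Int × Int) p =>
        if st.1 < p then (p, st.2.1, st.2.2)
        else (st.1, st.2.1 + p, st.2.2 + st.1)) (price, cost, income)).2.2
      - (r.foldl (fun (st : Int × Int × Int) p =>
        if st.1 < p then (p, st.2.1, st.2.2)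
        else (st.1, st.2.1 + p, st.2.2 + st.1)) (price, cost, income)).2.1
      = income - cost + pvBsum r price := by
  induction r generalizing price cost income with
  | nil => simp [pvBsum]
  | cons p r ih =>
    simp only [List.foldl_cons]
    by_cases h : price < p
    · have hm : max price p = p := by omega
      simp only [if_pos h]
      rw [ih]
      simp [pvBsum, hm]
    · have hm : max price p = price := by omega
      simp only [if_neg h]
      rw [ih]
      simp [pvBsum, hm]
      ring

theorem stockmax_eq_pvBsum (prices : List Int) :
    stockmax prices = pvBsum prices.reverse 0 := by
  unfold stockmax
  rw [show ((prices.length : Int) - 1) = ((-1 : Int) + 1 + (prices.length : Int) - 1) by ring]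
  rw [show PySem.List.pyRange ((-1 : Int) + 1 + (prices.length : Int) - 1) (-1) (-1)
      = (PySem.List.pyRange 0 (prices.length : Int) 1).reverse by
    rw [PySem.List.pyRange_neg_one_eq_reverse]; norm_num]
  rw [show ((PySem.List.pyRange 0 (prices.length : Int) 1).reverse.foldl
      (fun (st : Int × Int × Int) i =>
        if st.1 < PySem.List.pyGetD prices i 0 then (PySem.List.pyGetD prices i 0, st.2.1, st.2.2)
        else (st.1, st.2.1 + PySem.List.pyGetD prices i 0, st.2.2 + st.1)) ((0 : Int), (0 : Int), (0 : Int)))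
      = (((PySem.List.pyRange 0 (prices.length : Int) 1).reverse.map
          (fun i => PySem.List.pyGetD prices i 0)).foldl
        (fun (st : Int × Int × Int) p =>
          if st.1 < p then (p, st.2.1, st.2.2)
          else (st.1, st.2.1 + p, st.2.2 + st.1)) ((0 : Int), (0 : Int), (0 : Int)))
      from (List.foldl_map (f := fun i => PySem.List.pyGetD prices i 0)
        (g := fun (st : Int × Int × Int) p =>
          if st.1 < p then (p, st.2.1, st.2.2)
          else (st.1, st.2.1 + p, st.2.2 + st.1))
        (l := (PySem.List.pyRange 0 (prices.length : Int) 1).reverse)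
        (init := ((0 : Int), (0 : Int), (0 : Int)))).symm]
  rw [List.map_reverse, PySem.List.map_pyGetD_pyRange_zero']
  simpa using stockmax_foldlA prices.reverse 0 0 0

theorem pvSufR_foldlB (r : List Int) (acc : List Int) (b : Int) :
    (r.foldl (fun (st : List Int × Int) p =>
        (st.1 ++ [max st.2 p], max st.2 p)) (acc, b)).1 = acc ++ pvSufR r b := by
  induction r generalizing acc b with
  | nil => simp [pvSufR]
  | cons p r ih => simp [pvSufR, ih]

theorem pvZip_reverse {α β : Type} (xs : List α) (ys : List β) (h : xs.length = ys.length) :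
    xs.reverse.zip ys.reverse = (xs.zip ys).reverse := by
  induction xs generalizing ys with
  | nil => cases ys <;> simp_all
  | cons x xs ih =>
    cases ys with
    | nil => simp_all
    | cons y ys =>
      simp only [List.length_cons, Nat.succ_inj] at h
      rw [List.reverse_cons, List.reverse_cons, List.zip_append (by simp [h]), ih ys h]
      simp

theorem pvFoldl_add_sub (l : List (Int × Int)) (t : Int) :
    l.foldl (fun t mp => t + (mp.1 - mp.2)) t = t + (l.map (fun mp => mp.1 - mp.2)).sum := by
  induction l generalizing t with
  | nil => simp
  | cons x l ih => simp [ih]; ring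

theorem pvZipsum_sufR (r : List Int) (b : Int) :
    (((pvSufR r b).zip r).map (fun mp => mp.1 - mp.2)).sum = pvBsum r b := by
  induction r generalizing b with
  | nil => rfl
  | cons p r ih => simp [pvSufR, pvBsum, ih]

theorem stockmax_alt_eq_pvBsum (prices : List Int) :
    stockmax_alt prices = pvBsum prices.reverse 0 := by
  unfold stockmax_alt
  simp only [pvSufR_foldlB prices.reverse [] 0, List.nil_append]
  rw [show prices = prices.reverse.reverse by simp]
  rw [pvZip_reverse _ _ (by simp [pvSufR_length]), pvFoldl_add_sub]
  simp [List.sum_reverse, pvZipsum_sufR]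

-- ===== VERDICT (by name: the statement is the Claim_ definition above) =====
theorem stockmax_spec : Claim_equal_stockmax := by
  intro prices _
  unfold Spec_stockmax
  rw [stockmax_eq_pvBsum, stockmax_alt_eq_pvBsum]
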